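-- pv_equiv track=rewrite | github.com/FisherXZ/solar-gen | agent/src/runtime/compactor.py | _parse_summary_sections
-- ===== SOURCE A (Python) =====
-- def _format_summary(summary: str) -> str:
--     """Convert <summary>...</summary> XML to plain readable text.
--
--     Strips the XML tags and prepends 'Summary:\\n'.
--     Falls back to returning the string as-is if tags aren't present.
--     """
--     if "<summary>" in summary and "</summary>" in summary:
--         start = summary.find("<summary>") + len("<summary>")
--         end = summary.find("</summary>")
--         inner = summary[start:end].strip()
--         return "Summary:\n" + inner
--     return summary.strip()
--
-- def _parse_summary_sections(summary: str) -> tuple[list[str], list[str]]: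
--     """Split a formatted summary into (highlights, timeline) in a single pass.
--
--     Returns a 2-tuple: (non-timeline bullet lines, timeline lines).
--     Calls _format_summary once so callers don't have to.
--     """
--     formatted = _format_summary(summary)
--     highlights: list[str] = []
--     timeline: list[str] = []
--     in_timeline = False
--     for line in formatted.splitlines():
--         stripped = line.rstrip()
--         if stripped == "- Key timeline:":
--             in_timeline = True
--             continue
--         if in_timeline:
--             if not stripped:
--                 break
--             timeline.append(stripped)
--         else:
--             if not stripped or stripped in ("Summary:", "Conversation summary:"):
--                 continue
--             highlights.append(stripped)
--     return highlights, timeline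
-- ===== SOURCE B (Python) =====
-- def _format_summary(summary: str) -> str:
--     if "<summary>" in summary and "</summary>" in summary:
--         start = summary.find("<summary>") + len("<summary>")
--         end = summary.find("</summary>")
--         inner = summary[start:end].strip()
--         return "Summary:\n" + inner
--     return summary.strip()
--
-- def _parse_summary_sections(summary: str) -> tuple[list[str], list[str]]:
--     """Split a formatted summary into (highlights, timeline) by slicing
--     around the timeline marker instead of a stateful single pass."""
--     marker = "- Key timeline:"
--     stripped = [line.rstrip() for line in _format_summary(summary).splitlines()]
--     idx = stripped.index(marker) if marker in stripped else len(stripped)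
--     highlights = [s for s in stripped[:idx]
--                   if s and s not in ("Summary:", "Conversation summary:")]
--     tail = stripped[idx + 1:]
--     end = tail.index("") if "" in tail else len(tail)
--     timeline = [s for s in tail[:end] if s != marker]
--     return highlights, timeline
-- ===== Notes on version B (the rewrite author's own statement) =====
-- stated objective: alternative
-- what changed: Replaces A's stateful one-pass loop (in_timeline flag with continue/break) by a slice-based decomposition: rstrip all lines once, locate the marker index, filter the prefix for highlights and cut the post-marker tail at the first empty line for the timeline.
import Mathlib
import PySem

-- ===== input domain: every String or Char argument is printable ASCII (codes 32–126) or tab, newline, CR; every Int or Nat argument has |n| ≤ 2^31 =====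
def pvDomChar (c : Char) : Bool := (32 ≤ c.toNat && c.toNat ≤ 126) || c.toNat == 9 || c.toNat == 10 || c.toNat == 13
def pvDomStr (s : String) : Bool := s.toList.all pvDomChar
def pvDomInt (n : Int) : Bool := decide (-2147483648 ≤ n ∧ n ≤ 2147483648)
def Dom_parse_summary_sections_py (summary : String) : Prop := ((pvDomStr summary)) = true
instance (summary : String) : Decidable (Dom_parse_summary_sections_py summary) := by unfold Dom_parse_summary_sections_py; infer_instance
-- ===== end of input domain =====

-- B restructures A's stateful single pass into a slice-based decomposition; return values proved equal on all inputs.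

-- ===== PORT A =====
-- shared module helper _format_summary (both Pythons call the same helper)
def formatSummaryPy (summary : String) : String :=
  if PySem.Str.isIn "<summary>" summary && PySem.Str.isIn "</summary>" summary then
    let start := PySem.Str.find summary "<summary>" + 9
    let e := PySem.Str.find summary "</summary>"
    let inner := PySem.Str.strip (PySem.Str.slice summary (some start) (some e))
    "Summary:\n" ++ inner
  else
    PySem.Str.strip summary

-- A's for-loop with the in_timeline flag, continue and break, as structural recursion
def parseLoopA : List String → List String → List String → Bool → List String × List String
  | [], highlights, timeline, _ => (highlights, timeline)
  | line :: rest, highlights, timeline, inTimeline =>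
    let stripped := PySem.Str.rstrip line
    if stripped == "- Key timeline:" then
      parseLoopA rest highlights timeline true
    else if inTimeline then
      if stripped == "" then (highlights, timeline)      -- break
      else parseLoopA rest highlights (timeline ++ [stripped]) true
    else
      if stripped == "" || stripped == "Summary:" || stripped == "Conversation summary:" then
        parseLoopA rest highlights timeline false        -- continue
      else parseLoopA rest (highlights ++ [stripped]) timeline false

def parse_summary_sections_py (summary : String) : List String × List String :=
  parseLoopA (PySem.Str.splitlines (formatSummaryPy summary)) [] [] false

-- ===== PORT B =====
def parse_summary_sections_py_alt (summary : String) : List String × List String :=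
  let stripped := (PySem.Str.splitlines (formatSummaryPy summary)).map PySem.Str.rstrip
  let idx := (PySem.List.index? stripped "- Key timeline:").getD stripped.length
  let highlights := (stripped.take idx).filter
    (fun s => !(s == "" || s == "Summary:" || s == "Conversation summary:"))
  let tail := stripped.drop (idx + 1)
  let e := (PySem.List.index? tail "").getD tail.length
  let timeline := (tail.take e).filter (fun s => s != "- Key timeline:")
  (highlights, timeline)

-- ===== PRECONDITION & SPEC =====
def Spec_parse_summary_sections_py (summary : String) (out : List String × List String) : Prop := out = parse_summary_sections_py_alt summary
instance (summary : String) (out : List String × List String) : Decidable (Spec_parse_summary_sections_py summary out) := by unfold Spec_parse_summary_sections_py; infer_instance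

-- ===== CLAIM (what is proved, stated in full; the proofs are below) =====
def Claim_equal_parse_summary_sections_py : Prop := ∀ (summary : String), Dom_parse_summary_sections_py summary → Spec_parse_summary_sections_py summary (parse_summary_sections_py summary)

-- ===== LEMMAS AND PROOFS =====

-- the timeline phase of A's loop, on already-rstripped lines
def phase2 : List String → List String
  | [] => []
  | s :: r => if s == "- Key timeline:" then phase2 r
              else if s == "" then []
              else s :: phase2 r

-- getD of idxOf? steps through a non-matching head
theorem idx_cons_ne {a v : String} (r : List String) (h : (a == v) = false) :
    (List.idxOf? v (a :: r)).getD (a :: r).length = (List.idxOf? v r).getD r.length + 1 := by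
  rw [List.idxOf?_cons, if_neg (by simp [h])]
  cases List.idxOf? v r <;> simp

-- A's loop in timeline mode appends exactly phase2 of the rstripped rest
theorem parseLoopA_true (lines hs ts : List String) :
    parseLoopA lines hs ts true = (hs, ts ++ phase2 (lines.map PySem.Str.rstrip)) := by
  induction lines generalizing ts with
  | nil => simp [parseLoopA, phase2]
  | cons l r ih =>
    simp only [parseLoopA, List.map_cons, phase2]
    split_ifs with h1 h2
    · simp [ih]
    · simp
    · simp [ih]

-- phase2 equals B's cut-at-first-empty-then-drop-markers computation
theorem phase2_eq (st : List String) :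
    phase2 st = (st.take ((PySem.List.index? st "").getD st.length)).filter
      (fun s => s != "- Key timeline:") := by
  simp only [PySem.List.index?]
  induction st with
  | nil => simp [phase2]
  | cons s r ih =>
    by_cases h1 : (s == "- Key timeline:") = true
    · have hs : s = "- Key timeline:" := by simpa using h1
      subst hs
      simp only [phase2, BEq.rfl, if_true]
      rw [idx_cons_ne r (by decide), List.take_succ_cons,
          List.filter_cons_of_neg (by decide)]
      exact ih
    · have h1' : (s == "- Key timeline:") = false := by simpa using h1
      by_cases h2 : (s == "") = true
      · have hs : s = "" := by simpa using h2
        subst hs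
        simp only [phase2, h1', Bool.false_eq_true, if_false, BEq.rfl, if_true]
        rw [List.idxOf?_cons, if_pos (by decide)]
        simp
      · have h2' : (s == "") = false := by simpa using h2
        simp only [phase2, h1', h2', Bool.false_eq_true, if_false]
        rw [idx_cons_ne r h2', List.take_succ_cons,
            List.filter_cons_of_pos (by simp [bne, h1'])]
        rw [ih]

-- A's loop in highlight mode equals B's slice-based decomposition
theorem parseLoopA_false (lines hs ts : List String) :
    parseLoopA lines hs ts false =
      (let st := lines.map PySem.Str.rstrip
       let idx := (PySem.List.index? st "- Key timeline:").getD st.length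
       (hs ++ (st.take idx).filter
          (fun s => !(s == "" || s == "Summary:" || s == "Conversation summary:")),
        ts ++ ((st.drop (idx + 1)).take
            ((PySem.List.index? (st.drop (idx + 1)) "").getD (st.drop (idx + 1)).length)).filter
          (fun s => s != "- Key timeline:"))) := by
  simp only [PySem.List.index?]
  induction lines generalizing hs with
  | nil => simp [parseLoopA]
  | cons l r ih =>
    simp only [List.map_cons]
    by_cases h1 : (PySem.Str.rstrip l == "- Key timeline:") = true
    · have hs1 : PySem.Str.rstrip l = "- Key timeline:" := by simpa using h1
      simp only [parseLoopA, hs1, BEq.rfl, if_true]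
      rw [List.idxOf?_cons, if_pos (by decide)]
      simp only [List.drop_succ_cons]
      rw [parseLoopA_true r hs ts, phase2_eq]
      simp [PySem.List.index?]
    · have h1' : (PySem.Str.rstrip l == "- Key timeline:") = false := by simpa using h1
      rw [idx_cons_ne (List.map PySem.Str.rstrip r) h1', List.take_succ_cons, List.drop_succ_cons]
      by_cases h2 : (PySem.Str.rstrip l == "" || PySem.Str.rstrip l == "Summary:"
          || PySem.Str.rstrip l == "Conversation summary:") = true
      · simp only [parseLoopA, h1', Bool.false_eq_true, if_false, h2, if_true]
        rw [List.filter_cons_of_neg (by simp [h2]), ih hs]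
      · have h2' : _ = false := Bool.eq_false_iff.mpr h2
        simp only [parseLoopA, h1', Bool.false_eq_true, if_false, h2', if_false]
        rw [List.filter_cons_of_pos (by simp [h2']), ih (hs ++ [PySem.Str.rstrip l])]
        simp

-- ===== VERDICT (by name: the statement is the Claim_ definition above) =====
theorem parse_summary_sections_py_spec : Claim_equal_parse_summary_sections_py := by
  intro summary _
  unfold Spec_parse_summary_sections_py parse_summary_sections_py parse_summary_sections_py_alt
  rw [parseLoopA_false]
  simp
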